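-- pv_equiv track=rewrite | github.com/samuelbsantos66/Processador-de-Gramaticas | trabalho.ultramaster.py | eliminar_terminais_mistos
-- ===== SOURCE A (Python) =====
-- def eliminar_terminais_mistos(G):
--     novos_vars = {}
--     G_novo = {}
--     contador = 0
--
--     for A in G:
--         G_novo[A] = []
--         for prod in G[A]:
--             if prod == "eps" or len(prod) == 1:
--                 G_novo[A].append(prod)
--             else:
--                 nova_prod = ""
--                 for c in prod:
--                     if c.islower(): # é terminal
--                         if c not in novos_vars:
--                             contador += 1
--                             novos_vars[c] = f"T{contador}"
--                         nova_prod += novos_vars[c]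
--                     else:
--                         nova_prod += c
--                 G_novo[A].append(nova_prod)
--
--     # Adiciona as produções dos novos terminais isolados (Ex: T1 -> a)
--     for term, var in novos_vars.items():
--         G_novo[var] = [term]
--
--     return G_novo
-- ===== SOURCE B (Python) =====
-- def eliminar_terminais_mistos(G):
--     # Pass 1: collect, in first-encounter order over mixed productions,
--     # the lowercase terminals and assign them fresh variables T1, T2, ...
--     novos_vars = {}
--     contador = 0
--     for A in G:
--         for prod in G[A]:
--             if prod != "eps" and len(prod) > 1:
--                 for c in prod:
--                     if c.islower() and c not in novos_vars:
--                         contador += 1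
--                         novos_vars[c] = f"T{contador}"
--     # Pass 2: rebuild the grammar using the completed table.
--     G_novo = {}
--     for A in G:
--         G_novo[A] = [prod if prod == "eps" or len(prod) == 1
--                      else "".join(novos_vars.get(c, c) for c in prod)
--                      for prod in G[A]]
--     # Productions of the new variables (Ex: T1 -> a).
--     for term, var in novos_vars.items():
--         G_novo[var] = [term]
--     return G_novo
-- ===== Notes on version B (the rewrite author's own statement) =====
-- stated objective: alternative
-- what changed: Replaces A's single interleaved pass (which assigns fresh variables while building each rewritten production string) by an index-first decomposition: one collection pass that builds the complete terminal->variable table, then a separate rebuild pass mapping every character through the finished table via dict.get, plus a list comprehension instead of append loops.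
import Mathlib
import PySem

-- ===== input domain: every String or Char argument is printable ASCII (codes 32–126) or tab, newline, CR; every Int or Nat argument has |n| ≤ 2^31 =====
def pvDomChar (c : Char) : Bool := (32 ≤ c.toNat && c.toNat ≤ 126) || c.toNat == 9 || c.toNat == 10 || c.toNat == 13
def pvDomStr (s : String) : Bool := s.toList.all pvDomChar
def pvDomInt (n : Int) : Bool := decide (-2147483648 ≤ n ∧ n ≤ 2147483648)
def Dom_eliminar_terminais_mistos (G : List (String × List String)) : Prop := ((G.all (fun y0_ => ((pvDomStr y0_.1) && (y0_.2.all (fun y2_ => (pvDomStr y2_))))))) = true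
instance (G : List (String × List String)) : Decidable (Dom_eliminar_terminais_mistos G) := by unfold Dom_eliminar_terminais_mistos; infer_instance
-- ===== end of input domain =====

-- B replaces A's interleaved assign-while-rewriting pass by a collect-then-rebuild decomposition
-- (index first, transform second); same cost, alternative structure.


-- ===== PORT A =====
-- one character of the inner 'for c in prod' loop: state (novos_vars, contador, nova_prod chars)
def etmCharA (st : PySem.Dict Char String × Int × List Char) (c : Char) :
    PySem.Dict Char String × Int × List Char :=
  if PySem.Chars.islower c then
    if st.1.contains c then (st.1, st.2.1, st.2.2 ++ (st.1.getD c "").toList)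
    else
      let v := "T" ++ PySem.Int.toStr (st.2.1 + 1)
      (st.1.insert c v, st.2.1 + 1, st.2.2 ++ v.toList)
  else (st.1, st.2.1, st.2.2 ++ [c])

-- one production of the 'for prod in G[A]' loop: state (this key's list so far, novos_vars, contador)
def etmProdA (st : List String × PySem.Dict Char String × Int) (prod : String) :
    List String × PySem.Dict Char String × Int :=
  if prod = "eps" ∨ PySem.Str.len prod = 1 then (st.1 ++ [prod], st.2)
  else
    let r := prod.toList.foldl etmCharA (st.2.1, st.2.2, [])
    (st.1 ++ [String.ofList r.2.2], r.1, r.2.1)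

-- Python iterates the dict's keys and looks each key up; under Pre_ (unique keys, a dict
-- input always has them) that is the association list itself, and 'G_novo[A] = []' followed
-- by appends inside the loop builds exactly the per-key list inserted here.
def eliminar_terminais_mistos (G : List (String × List String)) : List (String × List String) :=
  let fin := G.foldl
    (fun (st : PySem.Dict String (List String) × PySem.Dict Char String × Int) p =>
      let r := p.2.foldl etmProdA ([], st.2.1, st.2.2)
      (st.1.insert p.1 r.1, r.2.1, r.2.2))
    (PySem.Dict.empty, PySem.Dict.empty, 0)
  (fin.2.1.items.foldl (fun g q => g.insert q.2 [String.ofList [q.1]]) fin.1).items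

-- ===== PORT B =====
-- pass 1, one character: extend the table when c is an unseen lowercase terminal
def etmCollect (st : PySem.Dict Char String × Int) (c : Char) : PySem.Dict Char String × Int :=
  if PySem.Chars.islower c ∧ ¬ st.1.contains c then
    (st.1.insert c ("T" ++ PySem.Int.toStr (st.2 + 1)), st.2 + 1)
  else st

def etmCollectProd (st : PySem.Dict Char String × Int) (prod : String) :
    PySem.Dict Char String × Int :=
  if prod ≠ "eps" ∧ PySem.Str.len prod > 1 then prod.toList.foldl etmCollect st else st

-- pass 2: rewrite one production through the completed table (novos_vars.get(c, c))
def etmRewrite (nv : PySem.Dict Char String) (prod : String) : String :=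
  if prod = "eps" ∨ PySem.Str.len prod = 1 then prod
  else String.ofList ((prod.toList.map (fun c => (nv.getD c (String.ofList [c])).toList)).flatten)

def eliminar_terminais_mistos_alt (G : List (String × List String)) : List (String × List String) :=
  let nv := (G.foldl (fun st p => p.2.foldl etmCollectProd st) (PySem.Dict.empty, 0)).1
  let gn := G.foldl (fun (g : PySem.Dict String (List String)) p =>
      g.insert p.1 (p.2.map (etmRewrite nv))) PySem.Dict.empty
  (nv.items.foldl (fun g q => g.insert q.2 [String.ofList [q.1]]) gn).items

-- ===== PRECONDITION & SPEC =====
-- Pre_ excludes association lists with duplicate keys: A's argument is a Python dict, which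
-- cannot represent them, so its behaviour there is not defined by A.
def Pre_eliminar_terminais_mistos (G : List (String × List String)) : Prop :=
  (G.map Prod.fst).Nodup
instance (G : List (String × List String)) : Decidable (Pre_eliminar_terminais_mistos G) := by
  unfold Pre_eliminar_terminais_mistos; infer_instance

def pvWitness_eliminar_terminais_mistos : (List (String × List String)) :=
  [("S", ["aB", "b", "eps"]), ("B", ["Sc"])]

def Spec_eliminar_terminais_mistos (G : List (String × List String)) (out : List (String × List String)) : Prop := out = eliminar_terminais_mistos_alt G
instance (G : List (String × List String)) (out : List (String × List String)) : Decidable (Spec_eliminar_terminais_mistos G out) := by unfold Spec_eliminar_terminais_mistos; infer_instance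

-- ===== CLAIM (what is proved, stated in full; the proofs are below) =====
def Claim_equal_eliminar_terminais_mistos : Prop := ∀ (G : List (String × List String)), Dom_eliminar_terminais_mistos G → Pre_eliminar_terminais_mistos G → Spec_eliminar_terminais_mistos G (eliminar_terminais_mistos G)

-- ===== LEMMAS AND PROOFS =====

-- lookup extension between tables: everything d knows, d' knows with the same value
def EExt (d d' : PySem.Dict Char String) : Prop :=
  ∀ c v, d.get? c = some v → d'.get? c = some v

theorem eext_refl (d : PySem.Dict Char String) : EExt d d := fun _ _ h => h

theorem eext_trans {d₁ d₂ d₃ : PySem.Dict Char String} (h₁ : EExt d₁ d₂) (h₂ : EExt d₂ d₃) :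
    EExt d₁ d₃ := fun c v h => h₂ c v (h₁ c v h)

theorem eext_collect_step (st : PySem.Dict Char String × Int) (c : Char) :
    EExt st.1 (etmCollect st c).1 := by
  unfold etmCollect
  split_ifs with h
  · rcases h with ⟨-, hc⟩
    intro a v hv
    have hne : a ≠ c := by
      rintro rfl
      rw [PySem.Dict.contains_eq_isSome_get?, hv] at hc
      exact hc rfl
    simpa [PySem.Dict.get?_insert_of_ne _ _ hne] using hv
  · exact eext_refl _

theorem eext_foldl {β : Type} (f : (PySem.Dict Char String × Int) → β → (PySem.Dict Char String × Int))
    (hf : ∀ st x, EExt st.1 (f st x).1) :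
    ∀ (l : List β) (st : PySem.Dict Char String × Int), EExt st.1 (l.foldl f st).1 := by
  intro l
  induction l with
  | nil => intro st; exact eext_refl _
  | cons x xs ih => intro st; exact eext_trans (hf st x) (ih (f st x))

theorem eext_collect (cs : List Char) (st : PySem.Dict Char String × Int) :
    EExt st.1 (cs.foldl etmCollect st).1 :=
  eext_foldl etmCollect eext_collect_step cs st

theorem eext_collectProd_step (st : PySem.Dict Char String × Int) (prod : String) :
    EExt st.1 (etmCollectProd st prod).1 := by
  unfold etmCollectProd
  split_ifs with h
  · exact eext_collect _ _
  · exact eext_refl _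

theorem eext_collectProd (prods : List String) (st : PySem.Dict Char String × Int) :
    EExt st.1 (prods.foldl etmCollectProd st).1 :=
  eext_foldl etmCollectProd eext_collectProd_step prods st

theorem eext_gram (L : List (String × List String)) (st : PySem.Dict Char String × Int) :
    EExt st.1 (L.foldl (fun st p => p.2.foldl etmCollectProd st) st).1 :=
  eext_foldl _ (fun st p => eext_collectProd p.2 st) L st

-- every key of the table is a lowercase character
def LowKeys (d : PySem.Dict Char String) : Prop :=
  ∀ c, d.contains c = true → PySem.Chars.islower c = true

theorem lowKeys_collect_step (st : PySem.Dict Char String × Int) (c : Char)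
    (h : LowKeys st.1) : LowKeys (etmCollect st c).1 := by
  unfold etmCollect
  split_ifs with hg
  · intro a ha
    rw [PySem.Dict.contains_insert] at ha
    rcases Bool.or_eq_true_iff.mp ha with ha | ha
    · rw [beq_iff_eq] at ha; subst ha; exact hg.1
    · exact h a ha
  · exact h

theorem lowKeys_foldl {β : Type} (f : (PySem.Dict Char String × Int) → β → (PySem.Dict Char String × Int))
    (hf : ∀ st x, LowKeys st.1 → LowKeys (f st x).1) :
    ∀ (l : List β) (st : PySem.Dict Char String × Int), LowKeys st.1 → LowKeys (l.foldl f st).1 := by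
  intro l
  induction l with
  | nil => intro st h; exact h
  | cons x xs ih => intro st h; exact ih (f st x) (hf st x h)

theorem lowKeys_gram (L : List (String × List String)) :
    LowKeys (L.foldl (fun st p => p.2.foldl etmCollectProd st) (PySem.Dict.empty, 0)).1 := by
  refine lowKeys_foldl _ (fun st p hst => ?_) L _ ?_
  · refine lowKeys_foldl etmCollectProd (fun st prod hst => ?_) p.2 st hst
    unfold etmCollectProd
    split_ifs with h
    · exact lowKeys_foldl etmCollect lowKeys_collect_step _ st hst
    · exact hst
  · intro c hc
    rw [PySem.Dict.contains_empty] at hc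
    exact absurd hc (by simp)

-- A's character loop: its table/counter state is exactly B's collection pass, and its output
-- is the characters mapped through ANY table NV extending the collected one (with only
-- lowercase keys) — the heart of the interleaved-vs-two-pass equivalence.
theorem charA_eq (cs : List Char) :
    ∀ (nv : PySem.Dict Char String) (k : Int) (acc : List Char) (NV : PySem.Dict Char String),
    EExt (cs.foldl etmCollect (nv, k)).1 NV → LowKeys NV →
    cs.foldl etmCharA (nv, k, acc) =
      ((cs.foldl etmCollect (nv, k)).1, (cs.foldl etmCollect (nv, k)).2,
        acc ++ (cs.map (fun c => (NV.getD c (String.ofList [c])).toList)).flatten) := by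
  induction cs with
  | nil => intro nv k acc NV _ _; simp
  | cons c cs ih =>
    intro nv k acc NV hext hlow
    by_cases hl : PySem.Chars.islower c = true
    · by_cases hc : nv.contains c = true
      · -- seen terminal: A looks it up; the value survives to NV
        have hstep : etmCollect (nv, k) c = (nv, k) := by
          unfold etmCollect; rw [if_neg]; simp [hc]
        simp only [List.foldl_cons] at hext ⊢
        rw [hstep] at hext ⊢
        obtain ⟨v, hv⟩ : ∃ v, nv.get? c = some v := by
          rw [PySem.Dict.contains_eq_isSome_get?] at hc
          exact Option.isSome_iff_exists.mp hc
        have hNV : NV.get? c = some v := hext c v (eext_collect cs (nv, k) c v hv)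
        have hA : etmCharA (nv, k, acc) c = (nv, k, acc ++ v.toList) := by
          unfold etmCharA
          rw [if_pos hl, if_pos hc, PySem.Dict.getD_of_get?_eq_some _ _ hv]
        rw [hA, ih nv k _ NV hext hlow]
        simp [PySem.Dict.getD_of_get?_eq_some _ _ hNV]
      · -- fresh terminal: A assigns T(k+1); NV agrees via the extension chain
        have hc' : nv.contains c = false := by simpa using hc
        set v := "T" ++ PySem.Int.toStr (k + 1) with hvdef
        have hstep : etmCollect (nv, k) c = (nv.insert c v, k + 1) := by
          unfold etmCollect; rw [if_pos ⟨hl, by simp [hc']⟩]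
        simp only [List.foldl_cons] at hext ⊢
        rw [hstep] at hext ⊢
        have hNV : NV.get? c = some v :=
          hext c v (eext_collect cs (nv.insert c v, k + 1) c v
            (PySem.Dict.get?_insert_self nv c v))
        have hA : etmCharA (nv, k, acc) c = (nv.insert c v, k + 1, acc ++ v.toList) := by
          unfold etmCharA
          rw [if_pos hl, if_neg (by simp [hc'])]
        rw [hA, ih (nv.insert c v) (k + 1) _ NV hext hlow]
        simp [PySem.Dict.getD_of_get?_eq_some _ _ hNV]
    · -- non-terminal character: copied through; NV cannot contain it
      have hstep : etmCollect (nv, k) c = (nv, k) := by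
        unfold etmCollect; rw [if_neg]; simp [hl]
      simp only [List.foldl_cons] at hext ⊢
      rw [hstep] at hext ⊢
      have hNV : NV.contains c = false := by
        cases h : NV.contains c
        · rfl
        · exact absurd (hlow c h) hl
      have hA : etmCharA (nv, k, acc) c = (nv, k, acc ++ [c]) := by
        unfold etmCharA; rw [if_neg (by simp [hl])]
      rw [hA, ih nv k _ NV hext hlow]
      simp [PySem.Dict.getD_of_not_contains _ _ hNV]

-- A's production loop: appends B's rewritten productions; state is B's collection pass
theorem prodA_eq (prods : List String) :
    ∀ (st : PySem.Dict Char String × Int) (acc : List String) (NV : PySem.Dict Char String),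
    EExt (prods.foldl etmCollectProd st).1 NV → LowKeys NV →
    prods.foldl etmProdA (acc, st) =
      (acc ++ prods.map (etmRewrite NV), prods.foldl etmCollectProd st) := by
  induction prods with
  | nil => intro st acc NV _ _; simp
  | cons prod prods ih =>
    intro st acc NV hext hlow
    simp only [List.foldl_cons] at hext ⊢
    by_cases h1 : prod = "eps" ∨ PySem.Str.len prod = 1
    · have hcp : etmCollectProd st prod = st := by
        unfold etmCollectProd
        rw [if_neg]
        rcases h1 with h1 | h1
        · simp [h1]
        · rw [not_and_or]; right; omega
      have hA : etmProdA (acc, st) prod = (acc ++ [prod], st) := by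
        unfold etmProdA; rw [if_pos h1]
      have hR : etmRewrite NV prod = prod := by
        unfold etmRewrite; rw [if_pos h1]
      rw [hcp] at hext ⊢
      rw [hA, ih st _ NV hext hlow]
      simp [hR]
    · -- mixed production: character loop = collection pass + mapping through NV
      have hcp : etmCollectProd st prod = prod.toList.foldl etmCollect st := by
        unfold etmCollectProd
        by_cases h2 : PySem.Str.len prod > 1
        · rw [if_pos ⟨fun he => h1 (Or.inl he), h2⟩]
        · have hlen0 : prod.toList.length = 0 := by
            have := PySem.Str.len_eq prod
            omega
          rw [if_neg (by rw [not_and_or]; right; exact h2),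
            List.length_eq_zero_iff.mp hlen0]
          simp
      rw [hcp] at hext
      have hext' : EExt (prod.toList.foldl etmCollect st).1 NV :=
        eext_trans (eext_collectProd prods _) hext
      have hA : etmProdA (acc, st) prod =
          (acc ++ [String.ofList ((prod.toList.map
              (fun c => (NV.getD c (String.ofList [c])).toList)).flatten)],
            prod.toList.foldl etmCollect st) := by
        unfold etmProdA
        rw [if_neg h1]
        rcases st with ⟨nv, k⟩
        rw [charA_eq prod.toList nv k [] NV hext' hlow]
        simp
      have hR : etmRewrite NV prod =
          String.ofList ((prod.toList.map
            (fun c => (NV.getD c (String.ofList [c])).toList)).flatten) := by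
        unfold etmRewrite; rw [if_neg h1]
      rw [hcp]
      rw [hA, ih _ _ NV hext hlow]
      simp [hR]

-- A's grammar loop: builds exactly B's pass-2 dictionary, with B's pass-1 state
theorem gramA_eq (L : List (String × List String)) :
    ∀ (g : PySem.Dict String (List String)) (st : PySem.Dict Char String × Int)
      (NV : PySem.Dict Char String),
    EExt (L.foldl (fun st p => p.2.foldl etmCollectProd st) st).1 NV → LowKeys NV →
    L.foldl (fun (st : PySem.Dict String (List String) × PySem.Dict Char String × Int) p =>
        let r := p.2.foldl etmProdA ([], st.2.1, st.2.2)
        (st.1.insert p.1 r.1, r.2.1, r.2.2)) (g, st) =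
      (L.foldl (fun g p => g.insert p.1 (p.2.map (etmRewrite NV))) g,
        L.foldl (fun st p => p.2.foldl etmCollectProd st) st) := by
  induction L with
  | nil => intro g st NV _ _; rfl
  | cons p L ih =>
    intro g st NV hext hlow
    simp only [List.foldl_cons] at hext ⊢
    have hp : p.2.foldl etmProdA ([], st.1, st.2) =
        (p.2.map (etmRewrite NV), p.2.foldl etmCollectProd st) := by
      have := prodA_eq p.2 st [] NV
        (eext_trans (eext_gram L (p.2.foldl etmCollectProd st)) hext) hlow
      simpa using this
    rw [hp]
    exact ih _ _ NV hext hlow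

-- ===== VERDICT (by name: the statement is the Claim_ definition above) =====
theorem eliminar_terminais_mistos_spec : Claim_equal_eliminar_terminais_mistos := by
  intro G _ _
  unfold Spec_eliminar_terminais_mistos
  unfold eliminar_terminais_mistos eliminar_terminais_mistos_alt
  have hmain := gramA_eq G PySem.Dict.empty (PySem.Dict.empty, 0)
    (G.foldl (fun st p => p.2.foldl etmCollectProd st) (PySem.Dict.empty, (0 : Int))).1
    (by
      intro c v hv
      exact hv)
    (lowKeys_gram G)
  simp only []
  rw [hmain]
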